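-- pv_equiv track=rewrite | github.com/Vitor-Almeida/landMarkClassification | lawclassification/dataset/append_token_hier.py | _easy_sentencesplit
-- ===== SOURCE A (Python) =====
-- def _easy_sentencesplit(text,maxlenghsen):
--
--     tokenList = text.split()
--     innerList = []
--
--     if len(tokenList) > maxlenghsen+2:
--         rangeWin = range(0, len(tokenList)-maxlenghsen+1, maxlenghsen)
--     else:
--         rangeWin = range(0, 1, maxlenghsen)
--
--     for i in rangeWin:
--         innerList.append(' '.join(tokenList[i:i+maxlenghsen]))
--
--     return innerList
-- ===== SOURCE B (Python) =====
-- def _easy_sentencesplit(text, maxlenghsen):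
--     # Consume the token list in complete fixed-size groups via the iterator-grouper
--     # idiom instead of index arithmetic over range()+slices.
--     tokens = text.split()
--     if maxlenghsen <= 0:
--         return []  # no positive-size window -> no chunks
--     if len(tokens) > maxlenghsen + 2:
--         return [' '.join(g) for g in zip(*[iter(tokens)] * maxlenghsen)]
--     return [' '.join(tokens[:maxlenghsen])]
-- ===== Notes on version B (the rewrite author's own statement) =====
-- stated objective: idiomatic
-- what changed: Replaces the range()-over-indices loop with start/stop slice arithmetic by the standard iterator-grouper idiom (zip of n copies of one iterator) that consumes the token list in complete fixed-size groups, with an explicit guard for non-positive window sizes instead of relying on empty ranges.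
import Mathlib
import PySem

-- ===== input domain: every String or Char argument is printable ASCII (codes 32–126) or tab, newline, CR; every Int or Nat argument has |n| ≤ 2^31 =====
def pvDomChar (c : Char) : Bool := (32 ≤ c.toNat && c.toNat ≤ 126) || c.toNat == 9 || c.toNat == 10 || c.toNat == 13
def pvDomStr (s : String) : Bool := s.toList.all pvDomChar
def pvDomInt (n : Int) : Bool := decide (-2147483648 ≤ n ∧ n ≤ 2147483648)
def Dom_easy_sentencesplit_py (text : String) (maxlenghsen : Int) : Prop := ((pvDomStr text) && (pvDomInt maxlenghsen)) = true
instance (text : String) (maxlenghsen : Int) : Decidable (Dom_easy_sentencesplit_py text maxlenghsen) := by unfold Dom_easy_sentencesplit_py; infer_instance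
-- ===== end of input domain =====

-- B replaces A's range()-over-start-indices loop with slice arithmetic by the iterator-grouper
-- idiom (complete fixed-size groups), with an explicit guard for non-positive window sizes; same cost.

-- ===== PORT A =====
def easy_sentencesplit_py (text : String) (maxlenghsen : Int) : List String :=
  let tokenList := PySem.Str.split₀ text
  let rangeWin :=
    if (tokenList.length : Int) > maxlenghsen + 2 then
      PySem.List.pyRange 0 ((tokenList.length : Int) - maxlenghsen + 1) maxlenghsen
    else
      PySem.List.pyRange 0 1 maxlenghsen
  rangeWin.foldl
    (fun acc i =>
      acc ++ [PySem.Str.join " " (PySem.List.slice tokenList (some i) (some (i + maxlenghsen)))])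
    []

-- ===== PORT B =====
-- complete fixed-size groups: Lean rendering of zip(*[iter(tokens)]*n)
def pvGroups {α : Type} (n : Nat) (xs : List α) : List (List α) :=
  if _h : 0 < n ∧ n ≤ xs.length then
    xs.take n :: pvGroups n (xs.drop n)
  else []
termination_by xs.length
decreasing_by simp only [List.length_drop]; omega

def easy_sentencesplit_py_alt (text : String) (maxlenghsen : Int) : List String :=
  let tokens := PySem.Str.split₀ text
  if maxlenghsen ≤ 0 then []
  else if (tokens.length : Int) > maxlenghsen + 2 then
    (pvGroups maxlenghsen.toNat tokens).map (fun g => PySem.Str.join " " g)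
  else [PySem.Str.join " " (PySem.List.slice tokens none (some maxlenghsen))]

-- ===== PRECONDITION & SPEC =====
-- Pre_ excludes only maxlenghsen = 0: there Python A raises ValueError (range() step 0) for every text.
def Pre_easy_sentencesplit_py (text : String) (maxlenghsen : Int) : Prop := maxlenghsen ≠ 0
instance (text : String) (maxlenghsen : Int) : Decidable (Pre_easy_sentencesplit_py text maxlenghsen) := by unfold Pre_easy_sentencesplit_py; infer_instance
def pvWitness_easy_sentencesplit_py : String × Int := ("a b c d e", 2)

def Spec_easy_sentencesplit_py (text : String) (maxlenghsen : Int) (out : List String) : Prop := out = easy_sentencesplit_py_alt text maxlenghsen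
instance (text : String) (maxlenghsen : Int) (out : List String) : Decidable (Spec_easy_sentencesplit_py text maxlenghsen out) := by unfold Spec_easy_sentencesplit_py; infer_instance

-- ===== CLAIM (what is proved, stated in full; the proofs are below) =====
def Claim_equal_easy_sentencesplit_py : Prop := ∀ (text : String) (maxlenghsen : Int), Dom_easy_sentencesplit_py text maxlenghsen → Pre_easy_sentencesplit_py text maxlenghsen → Spec_easy_sentencesplit_py text maxlenghsen (easy_sentencesplit_py text maxlenghsen)

-- ===== LEMMAS AND PROOFS =====

-- pvGroups characterised by start indices
lemma pvGroups_eq {α : Type} (n : Nat) (hn : 0 < n) (xs : List α) :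
    pvGroups n xs = (List.range (xs.length / n)).map (fun k => (xs.drop (n * k)).take n) := by
  rw [pvGroups]
  split_ifs with h
  · have hdiv : xs.length / n = (xs.drop n).length / n + 1 := by
      rw [List.length_drop, Nat.div_eq xs.length]
      simp [hn, h.2]
    rw [hdiv, List.range_succ_eq_map, List.map_cons, List.map_map,
        pvGroups_eq n hn (xs.drop n)]
    simp only [Nat.mul_zero, List.drop_zero, List.length_drop]
    congr 1
    apply List.map_congr_left
    intro k _
    rw [List.drop_drop]
    congr 2
    simp [Nat.mul_succ]
    omega
  · have hlt : xs.length < n := by omega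
    rw [Nat.div_eq_of_lt hlt]
    simp
termination_by xs.length
decreasing_by simp only [List.length_drop]; omega

theorem easy_sentencesplit_py_spec : Claim_equal_easy_sentencesplit_py := by
  intro text m _ hpre
  unfold Spec_easy_sentencesplit_py easy_sentencesplit_py easy_sentencesplit_py_alt
  simp only []
  set ts := PySem.Str.split₀ text with hts
  by_cases hm : m ≤ 0
  · -- m < 0: both ranges are empty, B returns []
    have hmneg : m < 0 := lt_of_le_of_ne hm hpre
    rw [if_pos hm]
    split_ifs with hgt
    · rw [PySem.List.pyRange_of_neg _ _ hmneg, if_neg (by omega)]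
      simp
    · rw [PySem.List.pyRange_of_neg _ _ hmneg, if_neg (by omega)]
      simp
  · have hmpos : 0 < m := by omega
    obtain ⟨n, rfl⟩ : ∃ n : Nat, m = (n : Int) := ⟨m.toNat, (Int.toNat_of_nonneg (by omega)).symm⟩
    have hn : 0 < n := by exact_mod_cast hmpos
    rw [if_neg hm]
    split_ifs with hgt
    · -- long case: full windows
      rw [PySem.List.pyRange_of_pos _ _ hmpos, if_pos (by omega),
          PySem.List.foldl_append_singleton_eq_map]
      have hcnt : ((((ts.length : Int)) - n + 1 - 0 + (n : Int) - 1) / (n : Int)).toNat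
          = ts.length / n := by
        have : (((ts.length : Int)) - n + 1 - 0 + (n : Int) - 1) = ((ts.length : Int)) := by ring
        rw [this, ← Int.natCast_div, Int.toNat_natCast]
      rw [hcnt, Int.toNat_natCast, pvGroups_eq n hn ts, List.map_map, List.map_map]
      apply List.map_congr_left
      intro k _
      simp only [Function.comp]
      have h1 : (0 : Int) + (n : Int) * (k : Int) = ((n * k : Nat) : Int) := by push_cast; ring
      rw [h1, PySem.List.slice_natCast_add]
    · -- short case: a single chunk
      rw [PySem.List.pyRange_of_pos _ _ hmpos, if_pos (by omega)]
      have hcnt : (((1 : Int) - 0 + (n : Int) - 1) / (n : Int)).toNat = 1 := by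
        have : ((1 : Int) - 0 + (n : Int) - 1) = (n : Int) := by ring
        rw [this, Int.ediv_self (by positivity)]
        rfl
      rw [hcnt]
      simp [PySem.List.slice_zero_start]
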